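-- pv_equiv track=rewrite | github.com/baeksangha/python_sw | 4261_빠른휴대전화키패드/source.py | solution
-- ===== SOURCE A (Python) =====
-- def solution(s, words):
--     keypad = ['0', '0', "abc", "def", "ghi", "jkl", "mno", "pqrs", "tuv", "wxyz"]
--     answer = 0
--     for word in words:
--         if len(word) != len(s):
--             continue
--         is_success = 1
--         for i in range(len(word)):
--             if word[i] not in keypad[int(s[i])]:
--                 is_success = 0
--                 break
--         if is_success:
--             answer += 1
--     return answer
-- ===== SOURCE B (Python) =====
-- def solution(s, words):
--     keypad = ['0', '0', "abc", "def", "ghi", "jkl", "mno", "pqrs", "tuv", "wxyz"]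
--     # transposed strategy: keep a shrinking set of candidate words and
--     # eliminate, position by position, every candidate whose character at
--     # that position is not on the key the pattern demands.
--     candidates = [w for w in words if len(w) == len(s)]
--     for i in range(len(s)):
--         if not candidates:
--             break
--         group = keypad[int(s[i])]
--         candidates = [w for w in candidates if w[i] in group]
--     return len(candidates)
-- ===== Notes on version B (the rewrite author's own statement) =====
-- stated objective: alternative
-- what changed: Transposes A's loops: instead of scanning each word's positions with a per-word break, B keeps a shrinking candidate list (words of the right length) and filters it position by position against the required key group, returning the survivor count.
-- outside the precondition, e.g. on solution('2x', ['zx']): A returns 0, B returns 0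
import Mathlib
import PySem

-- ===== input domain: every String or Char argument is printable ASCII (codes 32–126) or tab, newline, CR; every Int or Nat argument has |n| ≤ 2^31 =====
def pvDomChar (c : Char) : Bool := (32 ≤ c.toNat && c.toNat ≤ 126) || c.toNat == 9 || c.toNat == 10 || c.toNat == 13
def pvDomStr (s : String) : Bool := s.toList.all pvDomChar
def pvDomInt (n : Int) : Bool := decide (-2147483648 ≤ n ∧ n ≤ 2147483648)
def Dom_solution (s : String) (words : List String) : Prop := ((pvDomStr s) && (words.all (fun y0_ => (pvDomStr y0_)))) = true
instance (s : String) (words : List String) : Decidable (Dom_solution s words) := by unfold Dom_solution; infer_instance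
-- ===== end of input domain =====

-- B transposes A's loops: instead of scanning each word's positions with a per-word break,
-- it keeps a shrinking candidate list (same-length words) and filters it position by
-- position against the required key group; alternative decomposition, same asymptotic cost.


-- ===== PORT A =====
def keypadA : List String := ["0", "0", "abc", "def", "ghi", "jkl", "mno", "pqrs", "tuv", "wxyz"]

-- A's inner 'for i in range(len(word))' loop with break; it is only entered with
-- len(word) = len(s), so it walks both lists in step.
def aInner : List Char → List Char → Bool
  | [], _ => true
  | _ :: _, [] => true  -- unreachable: the caller guarantees equal lengths
  | w :: ws, c :: cs =>
      match PySem.Int.ofChars? [c] with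
      | none => false  -- Python: int(s[i]) raises ValueError here (excluded by Pre_)
      | some d =>
        match PySem.List.pyGet? keypadA d with
        | none => false  -- IndexError: unreachable, int of a digit char is 0..9
        | some g => if PySem.Chars.isIn [w] g.toList then aInner ws cs else false

def solution (s : String) (words : List String) : Int :=
  words.foldl (fun answer word =>
    if word.toList.length ≠ s.toList.length then answer
    else if aInner word.toList s.toList then answer + 1 else answer) 0

-- ===== PORT B =====
def bKeypad : List String := ["0", "0", "abc", "def", "ghi", "jkl", "mno", "pqrs", "tuv", "wxyz"]

-- B's 'for i in range(len(s))' loop: filter the candidate list at position i, break when empty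
def bLoop : List Char → Nat → List String → List String
  | [], _, cand => cand
  | c :: cs, i, cand =>
    if cand.isEmpty then cand  -- 'if not candidates: break'
    else
      match PySem.Int.ofChars? [c] with
      | none => []  -- Python: int(s[i]) raises ValueError here (excluded by Pre_)
      | some d =>
        match PySem.List.pyGet? bKeypad d with
        | none => []  -- IndexError: unreachable, int of a digit char is 0..9
        | some g =>
          bLoop cs (i + 1) (cand.filter (fun w =>
            match PySem.List.pyGet? w.toList (i : Int) with
            | none => false  -- unreachable: every candidate has length len(s) > i
            | some ch => PySem.Chars.isIn [ch] g.toList))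

def solution_alt (s : String) (words : List String) : Int :=
  ((bLoop s.toList 0 (words.filter (fun w => w.toList.length == s.toList.length))).length : Int)

-- ===== PRECONDITION & SPEC =====
-- Pre_ excludes inputs whose pattern s contains a non-digit character while some word has
-- s's length: there A generally raises ValueError at int(s[i]); on a few of them A still
-- returns 0 (every same-length word fails an earlier keypad check) and B returns 0 there too.
def Pre_solution (s : String) (words : List String) : Prop :=
  s.toList.all Char.isDigit = true ∨ words.all (fun w => w.toList.length != s.toList.length) = true
instance (s : String) (words : List String) : Decidable (Pre_solution s words) := by
  unfold Pre_solution; infer_instance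

def pvWitness_solution : String × List String := ("23", ["ad", "bf"])

def Spec_solution (s : String) (words : List String) (out : Int) : Prop := out = solution_alt s words
instance (s : String) (words : List String) (out : Int) : Decidable (Spec_solution s words out) := by unfold Spec_solution; infer_instance

-- ===== CLAIM (what is proved, stated in full; the proofs are below) =====
def Claim_equal_solution : Prop := ∀ (s : String) (words : List String), Dom_solution s words → Pre_solution s words → Spec_solution s words (solution s words)

-- ===== LEMMAS AND PROOFS =====

theorem digit_cases (c : Char) (h : c.isDigit = true) :
    c = '0' ∨ c = '1' ∨ c = '2' ∨ c = '3' ∨ c = '4' ∨ c = '5' ∨ c = '6' ∨ c = '7' ∨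
    c = '8' ∨ c = '9' := by
  simp [Char.isDigit] at h
  obtain ⟨h1, h2⟩ := h
  have hv : c = Char.ofNat c.toNat := (Char.ofNat_toNat c).symm
  have h1' : 48 ≤ c.toNat := h1
  have h2' : c.toNat ≤ 57 := h2
  interval_cases h3 : c.toNat <;> rw [hv] <;> decide

theorem digit_lookup (c : Char) (h : c.isDigit = true) :
    ∃ d g, PySem.Int.ofChars? [c] = some d ∧ PySem.List.pyGet? keypadA d = some g := by
  rcases digit_cases c h with h|h|h|h|h|h|h|h|h|h <;> subst h
  · exact ⟨0, "0", by decide, by decide⟩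
  · exact ⟨1, "0", by decide, by decide⟩
  · exact ⟨2, "abc", by decide, by decide⟩
  · exact ⟨3, "def", by decide, by decide⟩
  · exact ⟨4, "ghi", by decide, by decide⟩
  · exact ⟨5, "jkl", by decide, by decide⟩
  · exact ⟨6, "mno", by decide, by decide⟩
  · exact ⟨7, "pqrs", by decide, by decide⟩
  · exact ⟨8, "tuv", by decide, by decide⟩
  · exact ⟨9, "wxyz", by decide, by decide⟩

theorem aInner_nil (xs : List Char) : aInner xs [] = true := by
  cases xs <;> rfl

theorem bLoop_empty (cs : List Char) (i : Nat) : bLoop cs i [] = [] := by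
  cases cs <;> rfl

-- the invariant of B's position loop: with all remaining pattern chars digits and every
-- candidate of the right length, filtering position by position computes exactly the
-- per-word predicate A's inner scan decides
theorem bLoop_eq (cs : List Char) (i : Nat) (cand : List String)
    (hdig : ∀ c ∈ cs, c.isDigit = true)
    (hlen : ∀ w ∈ cand, w.toList.length = i + cs.length) :
    bLoop cs i cand = cand.filter (fun w => aInner (w.toList.drop i) cs) := by
  induction cs generalizing i cand with
  | nil =>
    rw [show bLoop [] i cand = cand from rfl]
    exact (List.filter_eq_self.mpr (fun w _ => aInner_nil _)).symm
  | cons c cs ih =>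
    cases hc : cand with
    | nil => rw [bLoop_empty, List.filter_nil]
    | cons w0 rest =>
      rw [← hc]
      have hne : cand.isEmpty = false := by rw [hc]; rfl
      obtain ⟨d, g, hd, hg⟩ := digit_lookup c (hdig c (by simp))
      have hgB : PySem.List.pyGet? bKeypad d = some g := hg
      simp only [bLoop, hne, hd, hgB, Bool.false_eq_true, if_false]
      rw [ih (i + 1) _ (fun x hx => hdig x (by simp [hx]))
        (by
          intro w hw
          have hw' := List.mem_of_mem_filter hw
          have := hlen w hw'
          rw [List.length_cons] at this
          omega)]
      rw [List.filter_filter]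
      apply List.filter_congr
      intro w hw
      have hlw : w.toList.length = i + (c :: cs).length := hlen w hw
      have hi : i < w.toList.length := by rw [List.length_cons] at hlw; omega
      have hget : PySem.List.pyGet? w.toList (i : Int) = some w.toList[i] := by
        rw [PySem.List.pyGet?_natCast]
        exact List.getElem?_eq_getElem hi
      have hdrop : w.toList.drop i = w.toList[i] :: w.toList.drop (i + 1) :=
        List.drop_eq_getElem_cons hi
      simp only [hget, hdrop, aInner, hd, hg]
      by_cases hin : PySem.Chars.isIn [w.toList[i]] g.toList = true
      · simp [hin]
      · simp [hin]

-- A's word loop counts the words passing the length guard and the inner scan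
theorem foldA (s : String) (ws : List String) (acc : Int) :
    ws.foldl (fun answer word =>
      if word.toList.length ≠ s.toList.length then answer
      else if aInner word.toList s.toList then answer + 1 else answer) acc
    = acc + ((ws.filter (fun w =>
        w.toList.length == s.toList.length && aInner w.toList s.toList)).length : Int) := by
  induction ws generalizing acc with
  | nil => simp
  | cons w ws ih =>
    simp only [List.foldl_cons, List.filter_cons]
    by_cases hl : w.toList.length = s.toList.length
    · have hlb : (w.toList.length == s.toList.length) = true := beq_iff_eq.mpr hl
      by_cases ha : aInner w.toList s.toList = true
      · rw [if_neg (not_not_intro hl), if_pos ha, ih,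
          if_pos (by rw [hlb, ha]; rfl)]
        push_cast [List.length_cons]
        ring
      · have ha' : aInner w.toList s.toList = false := Bool.eq_false_iff.mpr ha
        rw [if_neg (not_not_intro hl), if_neg ha, ih,
          if_neg (by rw [ha', Bool.and_false]; exact Bool.false_ne_true)]
    · have hlb : (w.toList.length == s.toList.length) = false :=
        beq_eq_false_iff_ne.mpr hl
      rw [if_pos hl, ih,
        if_neg (by rw [hlb, Bool.false_and]; exact Bool.false_ne_true)]

-- ===== VERDICT (by name: the statement is the Claim_ definition above) =====
theorem solution_spec : Claim_equal_solution := by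
  intro s words _ hpre
  unfold Spec_solution solution solution_alt
  rw [foldA]
  rcases hpre with hs | hlen
  · rw [bLoop_eq s.toList 0 _ (by simpa [List.all_eq_true] using hs)
      (by
        intro w hw
        have h2 : w.toList.length = s.toList.length := by
          simpa using List.of_mem_filter hw
        omega)]
    rw [List.filter_filter]
    simp only [List.drop_zero, zero_add]
    congr 1
    congr 1
    apply List.filter_congr
    intro w hw
    exact Bool.and_comm _ _
  · have hnil : words.filter (fun w => w.toList.length == s.toList.length) = [] := by
      apply List.filter_eq_nil_iff.mpr
      intro w hw
      have := (List.all_eq_true.mp hlen) w hw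
      simpa using this
    have hnil2 : words.filter (fun w =>
        w.toList.length == s.toList.length && aInner w.toList s.toList) = [] := by
      apply List.filter_eq_nil_iff.mpr
      intro w hw
      have := (List.all_eq_true.mp hlen) w hw
      simp at this ⊢
      intro h; exact absurd h this
    rw [hnil, hnil2, bLoop_empty]
    simp
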